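-- pv_equiv track=rewrite | github.com/Kevcillo/Arreglo-Multidimensional-Ingenieria | TareaSimulacionesCuadricula.py | suavizar_capa
-- ===== SOURCE A (Python) =====
-- def suavizar_capa(capa):
--     """Aplica filtro de promedio a una capa 2D"""
--     nueva_capa = [[0]*len(capa[0]) for _ in range(len(capa))]
--     for i in range(len(capa)):
--         for j in range(len(capa[0])):
--             # Obtener vecinos en 2D (incluyendo la celda actual)
--             vecinos = []
--             for di in [-1, 0, 1]:
--                 for dj in [-1, 0, 1]:
--                     ni, nj = i + di, j + dj
--                     if 0 <= ni < len(capa) and 0 <= nj < len(capa[0]):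
--                         vecinos.append(capa[ni][nj])
--             nueva_capa[i][j] = int(sum(vecinos) / len(vecinos))
--     return nueva_capa
-- ===== SOURCE B (Python) =====
-- def suavizar_capa(capa):
--     """3x3 box blur via a summed-area (2D prefix-sum) table; one pass to build,
--     one O(1) lookup per cell instead of gathering up to 9 neighbours."""
--     n = len(capa)
--     m = len(capa[0]) if capa else 0
--     # P[r][c] = sum of capa[a][b] for a < r, b < c (over the m-wide grid)
--     P = [[0] * (m + 1) for _ in range(n + 1)]
--     for i in range(n):
--         Pi, Pi1, row = P[i], P[i + 1], capa[i]
--         for j in range(m):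
--             Pi1[j + 1] = Pi1[j] + Pi[j + 1] - Pi[j] + row[j]
--     out = []
--     for i in range(n):
--         r0 = i - 1 if i > 0 else 0
--         r1 = i + 2 if i + 2 < n else n
--         fila = []
--         for j in range(m):
--             c0 = j - 1 if j > 0 else 0
--             c1 = j + 2 if j + 2 < m else m
--             s = P[r1][c1] - P[r0][c1] - P[r1][c0] + P[r0][c0]
--             fila.append(int(s / ((r1 - r0) * (c1 - c0))))
--         out.append(fila)
--     return out
-- ===== Notes on version B (the rewrite author's own statement) =====
-- stated objective: faster
-- what changed: Replaces the per-cell gathering of up to 9 neighbours into a list with a summed-area (2D prefix-sum) table built once, so each output cell is four table lookups and one division.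
import Mathlib
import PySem

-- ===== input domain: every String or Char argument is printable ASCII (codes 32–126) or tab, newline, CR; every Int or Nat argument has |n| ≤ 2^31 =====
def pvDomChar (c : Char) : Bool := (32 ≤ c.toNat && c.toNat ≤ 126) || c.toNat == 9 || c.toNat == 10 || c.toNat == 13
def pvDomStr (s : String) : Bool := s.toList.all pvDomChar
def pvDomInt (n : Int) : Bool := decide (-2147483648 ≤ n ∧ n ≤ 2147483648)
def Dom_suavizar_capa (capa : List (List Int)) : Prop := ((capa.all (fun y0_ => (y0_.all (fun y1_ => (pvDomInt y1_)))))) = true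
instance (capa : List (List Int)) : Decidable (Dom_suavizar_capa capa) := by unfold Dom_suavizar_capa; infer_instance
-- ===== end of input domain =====

-- B replaces A's per-cell gather of up to 9 neighbours with a summed-area (prefix-sum) table
-- built once; each output cell is then four table lookups and one division (measurably faster).

-- ===== PORT A =====
-- int(sum(vecinos)/len(vecinos)) is ported as truncating division: on Dom the sum has
-- |sum| ≤ 9·2^31 < 2^53 and the divisor is ≤ 9, so Python's float division followed by
-- int() truncation is exact and equals Int.tdiv.
def suavizar_capa (capa : List (List Int)) : List (List Int) :=
  let n := capa.length
  let m := (capa.headD []).length     -- len(capa[0]); when capa = [] the empty comprehension never evaluates it (n = 0 below)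
  (List.range n).map (fun (i : Nat) =>
    (List.range m).map (fun (j : Nat) =>
      let vecinos : List Int :=
        ([-1, 0, 1] : List Int).foldl (fun acc di =>
          ([-1, 0, 1] : List Int).foldl (fun acc dj =>
            let ni : Int := (i : Int) + di
            let nj : Int := (j : Int) + dj
            if 0 ≤ ni ∧ ni < (n : Int) ∧ 0 ≤ nj ∧ nj < (m : Int) then
              acc ++ [(capa.getD ni.toNat []).getD nj.toNat 0]   -- in-range by the guard
            else acc) acc) []
      (vecinos.sum).tdiv (vecinos.length : Int)))

-- ===== PORT B =====
-- inner loop of the table build: new[j+1] = new[j] + prev[j+1] - prev[j] + row[j]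
def pvRowGo (left : Int) : List Int → List Int → List Int
  | p0 :: p1 :: ps, x :: xs =>
      let v := left + p1 - p0 + x
      v :: pvRowGo v (p1 :: ps) xs
  | _, _ => []

def pvNextRow (prev row : List Int) : List Int := 0 :: pvRowGo 0 prev row

def pvTableGo : List Int → List (List Int) → List (List Int)
  | prev, [] => [prev]
  | prev, r :: rs => prev :: pvTableGo (pvNextRow prev r) rs

def suavizar_capa_alt (capa : List (List Int)) : List (List Int) :=
  let n := capa.length
  let m := (capa.headD []).length     -- len(capa[0]) if capa else 0
  let P := pvTableGo (List.replicate (m + 1) 0) capa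
  (List.range n).map (fun (i : Nat) =>
    (List.range m).map (fun (j : Nat) =>
      let r0 := i - 1
      let r1 := min n (i + 2)
      let c0 := j - 1
      let c1 := min m (j + 2)
      let s := (P.getD r1 []).getD c1 0 - (P.getD r0 []).getD c1 0
             - (P.getD r1 []).getD c0 0 + (P.getD r0 []).getD c0 0
      s.tdiv (((r1 - r0) * (c1 - c0) : Nat) : Int)))

-- ===== PRECONDITION & SPEC =====
-- Pre_ excludes only the jagged grids with a row shorter than row 0, on which A raises IndexError.
def Pre_suavizar_capa (capa : List (List Int)) : Prop :=
  ∀ row ∈ capa, (capa.headD []).length ≤ row.length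
instance (capa : List (List Int)) : Decidable (Pre_suavizar_capa capa) := by
  unfold Pre_suavizar_capa; infer_instance

def pvWitness_suavizar_capa : List (List Int) := [[1, 2], [3, 4]]

def Spec_suavizar_capa (capa : List (List Int)) (out : List (List Int)) : Prop := out = suavizar_capa_alt capa
instance (capa : List (List Int)) (out : List (List Int)) : Decidable (Spec_suavizar_capa capa out) := by unfold Spec_suavizar_capa; infer_instance

-- ===== CLAIM (what is proved, stated in full; the proofs are below) =====
def Claim_equal_suavizar_capa : Prop := ∀ (capa : List (List Int)), Dom_suavizar_capa capa → Pre_suavizar_capa capa → Spec_suavizar_capa capa (suavizar_capa capa)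

-- ===== LEMMAS AND PROOFS =====

-- the cell and prefix-sum abstractions the proof reasons about
def pvCell (capa : List (List Int)) (a b : Nat) : Int := (capa.getD a []).getD b 0

def pvS (capa : List (List Int)) (r c : Nat) : Int :=
  ∑ a ∈ Finset.range r, ∑ b ∈ Finset.range c, pvCell capa a b

theorem pvRowGo_take (ps : List Int) : ∀ (xs : List Int) (left p0 : Int),
    pvRowGo left (p0 :: ps) xs = pvRowGo left (p0 :: ps) (xs.take ps.length) := by
  induction ps with
  | nil => intro xs left p0; cases xs <;> simp [pvRowGo]
  | cons p1 ps ih =>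
      intro xs left p0
      cases xs with
      | nil => simp
      | cons x xs =>
          rw [List.length_cons, List.take_succ_cons]
          simp only [pvRowGo]
          rw [ih]

theorem pvRowGo_length : ∀ (xs ps : List Int) (left p0 : Int), xs.length ≤ ps.length →
    (pvRowGo left (p0 :: ps) xs).length = xs.length := by
  intro xs
  induction xs with
  | nil => intro ps left p0 _; cases ps <;> simp [pvRowGo]
  | cons x xs ih =>
      intro ps left p0 h
      cases ps with
      | nil => simp at h
      | cons p1 ps =>
          simp only [pvRowGo, List.length_cons]
          rw [ih ps (left + p1 - p0 + x) p1 (by simpa using h)]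

theorem pvRowGo_getD : ∀ (xs ps : List Int) (left p0 : Int) (c : Nat),
    xs.length ≤ ps.length → c < xs.length →
    (pvRowGo left (p0 :: ps) xs).getD c 0
      = left + ps.getD c 0 - p0 + ∑ b ∈ Finset.range (c + 1), xs.getD b 0 := by
  intro xs
  induction xs with
  | nil => intro ps left p0 c _ hc; simp at hc
  | cons x xs ih =>
      intro ps left p0 c h hc
      cases ps with
      | nil => simp at h
      | cons p1 ps =>
          cases c with
          | zero => simp [pvRowGo, Finset.sum_range_one]
          | succ c =>
              simp only [pvRowGo, List.getD_cons_succ]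
              rw [ih ps (left + p1 - p0 + x) p1 c (by simpa using h) (by simpa using hc)]
              rw [Finset.sum_range_succ' (fun b => (x :: xs).getD b 0)]
              simp only [List.getD_cons_succ, List.getD_cons_zero]
              ring

theorem pvNextRow_getD (prev row : List Int) (m c : Nat)
    (hp : prev.length = m + 1) (hr : m ≤ row.length) (hc : c ≤ m) :
    (pvNextRow prev row).getD c 0
      = prev.getD c 0 - prev.getD 0 0 + ∑ b ∈ Finset.range c, row.getD b 0 := by
  cases prev with
  | nil => simp at hp
  | cons p0 ps =>
      have hps : ps.length = m := by simpa using hp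
      cases c with
      | zero => simp [pvNextRow]
      | succ c =>
          have hcm : c < m := by omega
          simp only [pvNextRow, List.getD_cons_succ]
          rw [pvRowGo_take]
          have htl : (row.take ps.length).length ≤ ps.length := by simp
          have hcl : c < (row.take ps.length).length := by
            simp [List.length_take, hps]; omega
          rw [pvRowGo_getD _ _ _ _ _ htl hcl]
          have hsum : ∑ b ∈ Finset.range (c + 1), (row.take ps.length).getD b 0
              = ∑ b ∈ Finset.range (c + 1), row.getD b 0 := by
            apply Finset.sum_congr rfl
            intro b hb
            have hbc := Finset.mem_range.mp hb
            have hbp : b < ps.length := by omega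
            simp [List.getD, List.getElem?_take, hbp]
          rw [hsum]
          simp [List.getD_cons_succ]

theorem pvNextRow_length (prev row : List Int) (m : Nat)
    (hp : prev.length = m + 1) (hr : m ≤ row.length) : (pvNextRow prev row).length = m + 1 := by
  cases prev with
  | nil => simp at hp
  | cons p0 ps =>
      have hps : ps.length = m := by simpa using hp
      simp only [pvNextRow, List.length_cons]
      rw [pvRowGo_take, pvRowGo_length]
      · simp [hps]; omega
      · simp [hps]

theorem pvTableGo_getD : ∀ (rows : List (List Int)) (prev : List Int) (m r c : Nat),
    prev.length = m + 1 → (∀ row ∈ rows, m ≤ row.length) → prev.getD 0 0 = 0 →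
    r ≤ rows.length → c ≤ m →
    ((pvTableGo prev rows).getD r []).getD c 0
      = prev.getD c 0 + ∑ a ∈ Finset.range r, ∑ b ∈ Finset.range c, (rows.getD a []).getD b 0 := by
  intro rows
  induction rows with
  | nil =>
      intro prev m r c _ _ _ hr _
      have : r = 0 := by simpa using hr
      subst this
      simp [pvTableGo]
  | cons row rest ih =>
      intro prev m r c hp hrows h0 hr hc
      cases r with
      | zero => simp [pvTableGo]
      | succ r =>
          simp only [pvTableGo, List.getD_cons_succ]
          have hrow : m ≤ row.length := hrows row (by simp)
          rw [ih (pvNextRow prev row) m r c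
               (pvNextRow_length prev row m hp hrow)
               (fun q hq => hrows q (by simp [hq]))
               (by simp [pvNextRow])
               (by simpa using hr) hc]
          rw [pvNextRow_getD prev row m c hp hrow hc, h0]
          rw [Finset.sum_range_succ' (fun a => ∑ b ∈ Finset.range c, ((row :: rest).getD a []).getD b 0)]
          simp only [List.getD_cons_succ, List.getD_cons_zero]
          ring

-- the table entry is the rectangular prefix sum
theorem pvTable_getD (capa : List (List Int)) (m r c : Nat)
    (hm : ∀ row ∈ capa, m ≤ row.length) (hr : r ≤ capa.length) (hc : c ≤ m) :
    ((pvTableGo (List.replicate (m + 1) 0) capa).getD r []).getD c 0 = pvS capa r c := by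
  rw [pvTableGo_getD capa (List.replicate (m + 1) 0) m r c (by simp) hm (by simp) hr hc]
  simp [pvS, pvCell, List.getD_replicate]

-- clamped-interval sum expanded into the three possible neighbours
theorem pvIcoClamp (i n : Nat) (hi : i < n) (g : Nat → Int) :
    ∑ a ∈ Finset.Ico (i - 1) (min n (i + 2)), g a
      = (if 1 ≤ i then g (i - 1) else 0) + (g i + (if i + 1 < n then g (i + 1) else 0)) := by
  rcases Nat.eq_zero_or_pos i with h0 | h0
  · subst h0
    rw [show (0 : Nat) - 1 = 0 from rfl, Nat.Ico_zero_eq_range]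
    by_cases h1 : 1 < n
    · rw [show min n 2 = 2 by omega, Finset.sum_range_succ, Finset.sum_range_one]
      simp only [Nat.zero_add]
      split_ifs <;> first | (exfalso; omega) | ring
    · rw [show min n 2 = 1 by omega, Finset.sum_range_one]
      simp only [Nat.zero_add]
      split_ifs <;> first | (exfalso; omega) | ring
  · by_cases h1 : i + 1 < n
    · rw [show min n (i + 2) = i + 2 by omega, show i + 2 = i + 1 + 1 from rfl,
          Finset.sum_Ico_succ_top (by omega), Finset.sum_Ico_succ_top (by omega),
          Nat.Ico_pred_singleton h0, Finset.sum_singleton]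
      split_ifs <;> first | (exfalso; omega) | ring
    · rw [show min n (i + 2) = i + 1 by omega, Finset.sum_Ico_succ_top (by omega),
          Nat.Ico_pred_singleton h0, Finset.sum_singleton]
      split_ifs <;> first | (exfalso; omega) | ring

theorem pvClampCard (i n : Nat) (hi : i < n) :
    min n (i + 2) - (i - 1) = (if 1 ≤ i then 1 else 0) + (1 + (if i + 1 < n then 1 else 0)) := by
  split_ifs <;> omega

-- per-cell equality between A's gathered-neighbours value and B's table value
set_option maxHeartbeats 2000000 in
theorem pvCellEq (capa : List (List Int)) (n m i j : Nat)
    (hn : n = capa.length) (hm : m = (capa.headD []).length)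
    (hrows : ∀ row ∈ capa, m ≤ row.length) (hi : i < n) (hj : j < m) :
    (let vecinos : List Int :=
        ([-1, 0, 1] : List Int).foldl (fun acc di =>
          ([-1, 0, 1] : List Int).foldl (fun acc dj =>
            let ni : Int := (i : Int) + di
            let nj : Int := (j : Int) + dj
            if 0 ≤ ni ∧ ni < (n : Int) ∧ 0 ≤ nj ∧ nj < (m : Int) then
              acc ++ [(capa.getD ni.toNat []).getD nj.toNat 0]
            else acc) acc) []
     (vecinos.sum).tdiv (vecinos.length : Int))
    = (let P := pvTableGo (List.replicate (m + 1) 0) capa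
       let r0 := i - 1
       let r1 := min n (i + 2)
       let c0 := j - 1
       let c1 := min m (j + 2)
       let s := (P.getD r1 []).getD c1 0 - (P.getD r0 []).getD c1 0
              - (P.getD r1 []).getD c0 0 + (P.getD r0 []).getD c0 0
       s.tdiv (((r1 - r0) * (c1 - c0) : Nat) : Int)) := by
  -- rewrite B's four lookups into prefix sums, then into the clamped window sum
  have hr0 : i - 1 ≤ capa.length := by omega
  have hr1 : min n (i + 2) ≤ capa.length := by omega
  have hc0 : j - 1 ≤ m := by omega
  have hc1 : min m (j + 2) ≤ m := by omega
  simp only []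
  rw [pvTable_getD capa m _ _ hrows hr1 hc1, pvTable_getD capa m _ _ hrows hr0 hc1,
      pvTable_getD capa m _ _ hrows hr1 hc0, pvTable_getD capa m _ _ hrows hr0 hc0]
  have hwin : pvS capa (min n (i + 2)) (min m (j + 2)) - pvS capa (i - 1) (min m (j + 2))
      - pvS capa (min n (i + 2)) (j - 1) + pvS capa (i - 1) (j - 1)
      = ∑ a ∈ Finset.Ico (i - 1) (min n (i + 2)),
          ∑ b ∈ Finset.Ico (j - 1) (min m (j + 2)), pvCell capa a b := by
    unfold pvS
    rw [Finset.sum_Ico_eq_sub _ (by omega : i - 1 ≤ min n (i + 2))]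
    have hcol : ∀ a, ∑ b ∈ Finset.Ico (j - 1) (min m (j + 2)), pvCell capa a b
        = ∑ b ∈ Finset.range (min m (j + 2)), pvCell capa a b
          - ∑ b ∈ Finset.range (j - 1), pvCell capa a b := by
      intro a
      rw [Finset.sum_Ico_eq_sub _ (by omega : j - 1 ≤ min m (j + 2))]
    simp only [hcol, Finset.sum_sub_distrib]
    ring
  rw [hwin]
  -- expand the window sum into the (up to) nine neighbours and the neighbour count
  rw [pvIcoClamp i n hi (fun a => ∑ b ∈ Finset.Ico (j - 1) (min m (j + 2)), pvCell capa a b)]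
  have hcolsum : ∀ a, ∑ b ∈ Finset.Ico (j - 1) (min m (j + 2)), pvCell capa a b
      = (if 1 ≤ j then pvCell capa a (j - 1) else 0)
        + (pvCell capa a j + (if j + 1 < m then pvCell capa a (j + 1) else 0)) := by
    intro a; exact pvIcoClamp j m hj (fun b => pvCell capa a b)
  simp only [hcolsum]
  rw [pvClampCard i n hi, pvClampCard j m hj]
  -- now reduce A's fold
  have ti1 : ((i : Int) + -1).toNat = i - 1 := by omega
  have ti2 : ((i : Int) + 0).toNat = i := by omega
  have ti3 : ((i : Int) + 1).toNat = i + 1 := by omega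
  have tj1 : ((j : Int) + -1).toNat = j - 1 := by omega
  have tj2 : ((j : Int) + 0).toNat = j := by omega
  have tj3 : ((j : Int) + 1).toNat = j + 1 := by omega
  have ci1 : (0 ≤ (i:Int) + -1) ↔ 1 ≤ i := by omega
  have ci1' : ((i:Int) + -1 < (n:Int)) ↔ True := by constructor <;> intro <;> [trivial; omega]
  have ci2 : (0 ≤ (i:Int) + 0) ↔ True := by constructor <;> intro <;> [trivial; omega]
  have ci2' : ((i:Int) + 0 < (n:Int)) ↔ True := by constructor <;> intro <;> [trivial; omega]
  have ci3 : (0 ≤ (i:Int) + 1) ↔ True := by constructor <;> intro <;> [trivial; omega]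
  have ci3' : ((i:Int) + 1 < (n:Int)) ↔ i + 1 < n := by omega
  have cj1 : (0 ≤ (j:Int) + -1) ↔ 1 ≤ j := by omega
  have cj1' : ((j:Int) + -1 < (m:Int)) ↔ True := by constructor <;> intro <;> [trivial; omega]
  have cj2 : (0 ≤ (j:Int) + 0) ↔ True := by constructor <;> intro <;> [trivial; omega]
  have cj2' : ((j:Int) + 0 < (m:Int)) ↔ True := by constructor <;> intro <;> [trivial; omega]
  have cj3 : (0 ≤ (j:Int) + 1) ↔ True := by constructor <;> intro <;> [trivial; omega]
  have cj3' : ((j:Int) + 1 < (m:Int)) ↔ j + 1 < m := by omega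
  by_cases bi : 1 ≤ i <;> by_cases bi' : i + 1 < n <;> by_cases bj : 1 ≤ j <;> by_cases bj' : j + 1 < m <;>
    (simp [List.foldl, ti1, ti2, ti3, tj1, tj2, tj3, ci1, ci1', ci2, ci2', ci3, ci3',
           cj1, cj1', cj2, cj2', cj3, cj3', bi, bi', bj, bj', hi, hj, pvCell] <;>
     try (congr 1 <;> first | ring | omega | norm_num))

-- ===== VERDICT (by name: the statement is the Claim_ definition above) =====
theorem suavizar_capa_spec : Claim_equal_suavizar_capa := by
  intro capa _ hpre
  show suavizar_capa capa = suavizar_capa_alt capa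
  unfold suavizar_capa suavizar_capa_alt
  refine List.map_congr_left fun i hi => ?_
  refine List.map_congr_left fun j hj => ?_
  exact pvCellEq capa capa.length (capa.headD []).length i j rfl rfl hpre
    (List.mem_range.mp hi) (List.mem_range.mp hj)
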